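-- pv_equiv track=rewrite | github.com/devbis/django-mysql-pymysql | src/mysql_pymysql/base.py | date_trunc_sql
-- ===== SOURCE A (Python) =====
-- def date_trunc_sql(lookup_type, field_name):
--     fields = ['year', 'month', 'day', 'hour', 'minute', 'second']
--     format = ('%%Y-', '%%m', '-%%d', ' %%H:', '%%i', ':%%s') # Use double percents to escape.
--     format_def = ('0000-', '01', '-01', ' 00:', '00', ':00')
--     try:
--         i = fields.index(lookup_type) + 1
--     except ValueError:
--         sql = field_name
--     else:
--         format_str = ''.join([f for f in format[:i]] + [f for f in format_def[i:]])
--         sql = "CAST(DATE_FORMAT(%s, '%s') AS DATETIME)" % (field_name, format_str)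
--     return sql
-- ===== SOURCE B (Python) =====
-- _TRUNC_FORMATS = {
--     'year':   '%%Y-01-01 00:00:00',
--     'month':  '%%Y-%%m-01 00:00:00',
--     'day':    '%%Y-%%m-%%d 00:00:00',
--     'hour':   '%%Y-%%m-%%d %%H:00:00',
--     'minute': '%%Y-%%m-%%d %%H:%%i:00',
--     'second': '%%Y-%%m-%%d %%H:%%i:%%s',
-- }
--
-- def date_trunc_sql(lookup_type, field_name):
--     fmt = _TRUNC_FORMATS.get(lookup_type)
--     if fmt is None:
--         return field_name
--     return "CAST(DATE_FORMAT(%s, '%s') AS DATETIME)" % (field_name, fmt)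
-- ===== Notes on version B (the rewrite author's own statement) =====
-- stated objective: simpler
-- what changed: Replaces the three parallel arrays, the list .index with try/except, the two slices and the join with a single precomputed dict mapping each lookup_type directly to its fully assembled format string, looked up once with .get.
import Mathlib
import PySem

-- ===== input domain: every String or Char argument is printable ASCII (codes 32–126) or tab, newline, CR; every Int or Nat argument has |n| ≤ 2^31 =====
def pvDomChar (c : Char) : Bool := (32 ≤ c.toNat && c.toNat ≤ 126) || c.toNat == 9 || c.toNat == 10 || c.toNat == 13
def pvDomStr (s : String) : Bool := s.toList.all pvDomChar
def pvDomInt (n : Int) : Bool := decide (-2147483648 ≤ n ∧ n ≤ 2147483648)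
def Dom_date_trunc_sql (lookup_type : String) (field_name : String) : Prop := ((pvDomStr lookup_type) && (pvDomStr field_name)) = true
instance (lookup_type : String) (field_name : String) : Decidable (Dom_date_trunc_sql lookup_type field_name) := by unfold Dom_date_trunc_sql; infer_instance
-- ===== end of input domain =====

-- B replaces the parallel arrays + .index + slices + join of A by one precomputed
-- dict from lookup_type to the fully assembled format string (objective: simpler).

-- ===== PORT A =====
def date_trunc_sql (lookup_type : String) (field_name : String) : String :=
  let fields : List String := ["year", "month", "day", "hour", "minute", "second"]
  let format : List String := ["%%Y-", "%%m", "-%%d", " %%H:", "%%i", ":%%s"]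
  let format_def : List String := ["0000-", "01", "-01", " 00:", "00", ":00"]
  match PySem.List.index? fields lookup_type with
  | none => field_name
  | some i0 =>
      let i : Int := (i0 : Int) + 1
      let format_str := PySem.Str.join ""
        (PySem.List.slice format none (some i) ++ PySem.List.slice format_def (some i) none)
      "CAST(DATE_FORMAT(" ++ field_name ++ ", '" ++ format_str ++ "') AS DATETIME)"

-- ===== PORT B =====
def pvTruncTable : PySem.Dict String String := PySem.Dict.ofList
  [ ("year",   "%%Y-01-01 00:00:00"),
    ("month",  "%%Y-%%m-01 00:00:00"),
    ("day",    "%%Y-%%m-%%d 00:00:00"),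
    ("hour",   "%%Y-%%m-%%d %%H:00:00"),
    ("minute", "%%Y-%%m-%%d %%H:%%i:00"),
    ("second", "%%Y-%%m-%%d %%H:%%i:%%s") ]

def date_trunc_sql_alt (lookup_type : String) (field_name : String) : String :=
  match PySem.Dict.get? pvTruncTable lookup_type with
  | none => field_name
  | some fmt => "CAST(DATE_FORMAT(" ++ field_name ++ ", '" ++ fmt ++ "') AS DATETIME)"

-- ===== PRECONDITION & SPEC =====
def Spec_date_trunc_sql (lookup_type : String) (field_name : String) (out : String) : Prop := out = date_trunc_sql_alt lookup_type field_name
instance (lookup_type : String) (field_name : String) (out : String) : Decidable (Spec_date_trunc_sql lookup_type field_name out) := by unfold Spec_date_trunc_sql; infer_instance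

-- ===== CLAIM (what is proved, stated in full; the proofs are below) =====
def Claim_equal_date_trunc_sql : Prop := ∀ (lookup_type : String) (field_name : String), Dom_date_trunc_sql lookup_type field_name → Spec_date_trunc_sql lookup_type field_name (date_trunc_sql lookup_type field_name)

-- ===== LEMMAS AND PROOFS =====

theorem date_trunc_sql_eq_alt_of_not_mem (lt fn : String)
    (h1 : lt ≠ "year") (h2 : lt ≠ "month") (h3 : lt ≠ "day")
    (h4 : lt ≠ "hour") (h5 : lt ≠ "minute") (h6 : lt ≠ "second") :
    date_trunc_sql lt fn = date_trunc_sql_alt lt fn := by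
  have hidx : List.idxOf? lt ["year", "month", "day", "hour", "minute", "second"] = none := by
    rw [← PySem.List.index?_eq_idxOf?, PySem.List.index?_eq_none_iff]
    simp [h1, h2, h3, h4, h5, h6]
  have htab : pvTruncTable = PySem.Dict.mk
      [ ("year",   "%%Y-01-01 00:00:00"),
        ("month",  "%%Y-%%m-01 00:00:00"),
        ("day",    "%%Y-%%m-%%d 00:00:00"),
        ("hour",   "%%Y-%%m-%%d %%H:00:00"),
        ("minute", "%%Y-%%m-%%d %%H:%%i:00"),
        ("second", "%%Y-%%m-%%d %%H:%%i:%%s") ] := by decide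
  have hget : PySem.Dict.get? pvTruncTable lt = none := by
    rw [htab]
    simp [PySem.Dict.get?, Ne.symm h1, Ne.symm h2, Ne.symm h3, Ne.symm h4,
      Ne.symm h5, Ne.symm h6]
  simp [date_trunc_sql, date_trunc_sql_alt, hidx, hget]

-- ===== VERDICT (by name: the statement is the Claim_ definition above) =====
theorem date_trunc_sql_spec : Claim_equal_date_trunc_sql := by
  intro lt fn _
  unfold Spec_date_trunc_sql
  by_cases h1 : lt = "year";   · subst h1; rfl
  by_cases h2 : lt = "month";  · subst h2; rfl
  by_cases h3 : lt = "day";    · subst h3; rfl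
  by_cases h4 : lt = "hour";   · subst h4; rfl
  by_cases h5 : lt = "minute"; · subst h5; rfl
  by_cases h6 : lt = "second"; · subst h6; rfl
  exact date_trunc_sql_eq_alt_of_not_mem lt fn h1 h2 h3 h4 h5 h6
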